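-- pv_equiv track=rewrite | github.com/Saurav1375/pokedle | backend/feedback.py | validate_feedback_consistency
-- ===== SOURCE A (Python) =====
-- from typing import Dict, List, Set
--
-- def validate_feedback_consistency(feedback_history: List[tuple]) -> bool:
--     """
--     NEW FUNCTION: Validate that feedback history is logically consistent.
--
--     This helps catch bugs in the solving algorithms.
--
--     Returns:
--         True if consistent, False if contradictions found
--     """
--     # Check for contradictions in feedback
--     green_constraints = {}  # attr -> value that must be green
--
--     for guess_idx, feedback in feedback_history:
--         for attr, status in feedback.items():
--             if attr == 'image_url':
--                 continue
--
--             if status == 'green':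
--                 # If we previously saw green for this attr with different value, contradiction
--                 if attr in green_constraints and green_constraints[attr] != guess_idx:
--                     return False
--                 green_constraints[attr] = guess_idx
--
--     return True
-- ===== SOURCE B (Python) =====
-- def validate_feedback_consistency(feedback_history):
--     """
--     Flatten-then-count re-implementation: collect the distinct (attr, guess_idx)
--     pairs reported green (skipping 'image_url'); the history is consistent iff
--     no attribute occurs in two distinct pairs, i.e. iff the attrs of the
--     distinct pairs are themselves all distinct.
--     """
--     green_pairs = {(attr, guess_idx)
--                    for guess_idx, feedback in feedback_history
--                    for attr, status in feedback.items()
--                    if attr != 'image_url' and status == 'green'}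
--     attrs = [attr for attr, _ in green_pairs]
--     return len(attrs) == len(set(attrs))
-- ===== Notes on version B (the rewrite author's own statement) =====
-- stated objective: alternative
-- what changed: Replaced the stateful scan with an early return over a last-seen-value dict by a declarative flatten-then-count: a set comprehension collects all distinct (attr, guess_idx) green pairs, and consistency is the cardinality test len(attrs) == len(set(attrs)) on the pairs' first components.
import Mathlib
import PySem

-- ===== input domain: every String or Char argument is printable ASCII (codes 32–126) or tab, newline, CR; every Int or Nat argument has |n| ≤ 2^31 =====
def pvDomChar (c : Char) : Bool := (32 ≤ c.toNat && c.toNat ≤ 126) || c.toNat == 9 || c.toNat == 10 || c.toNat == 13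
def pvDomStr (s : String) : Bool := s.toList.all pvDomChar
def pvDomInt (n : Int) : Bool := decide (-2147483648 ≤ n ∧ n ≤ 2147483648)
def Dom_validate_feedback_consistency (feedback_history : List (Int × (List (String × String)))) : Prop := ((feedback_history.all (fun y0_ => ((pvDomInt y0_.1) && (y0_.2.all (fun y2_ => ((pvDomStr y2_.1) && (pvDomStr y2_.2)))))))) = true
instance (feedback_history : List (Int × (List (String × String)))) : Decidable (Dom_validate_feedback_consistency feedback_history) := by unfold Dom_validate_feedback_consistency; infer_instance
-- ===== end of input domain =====

-- B replaces A's stateful early-exit scan by a flatten-to-set-of-pairs + cardinality check — objective: alternative decomposition, same cost.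

-- ===== PORT A =====
-- inner loop 'for attr, status in feedback.items(): …'; none = the 'return False' path.
-- 'attr in green_constraints and green_constraints[attr] != guess_idx' is rendered as a
-- match on get? (present-with-value check), the exact short-circuit meaning of the Python line.
def pvAInner (gc : PySem.Dict String Int) (guess_idx : Int) :
    List (String × String) → Option (PySem.Dict String Int)
  | [] => some gc
  | (attr, status) :: rest =>
    if attr = "image_url" then pvAInner gc guess_idx rest
    else if status = "green" then
      match gc.get? attr with
      | some v =>
        if v ≠ guess_idx then none
        else pvAInner (gc.insert attr guess_idx) guess_idx rest
      | none => pvAInner (gc.insert attr guess_idx) guess_idx rest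
    else pvAInner gc guess_idx rest

-- outer loop 'for guess_idx, feedback in feedback_history:'
def pvAOuter (gc : PySem.Dict String Int) :
    List (Int × List (String × String)) → Bool
  | [] => true
  | (guess_idx, feedback) :: rest =>
    match pvAInner gc guess_idx feedback with
    | none => false
    | some gc' => pvAOuter gc' rest

def validate_feedback_consistency (feedback_history : List (Int × (List (String × String)))) : Bool :=
  pvAOuter PySem.Dict.empty feedback_history

-- ===== PORT B =====
-- the set comprehension, inner generator 'for attr, status in feedback.items() if …'
def pvBInner (S : PySem.Set (String × Int)) (guess_idx : Int) :
    List (String × String) → PySem.Set (String × Int)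
  | [] => S
  | (attr, status) :: rest =>
    if attr ≠ "image_url" ∧ status = "green" then
      pvBInner (PySem.Set.add S (attr, guess_idx)) guess_idx rest
    else pvBInner S guess_idx rest

-- the set comprehension, outer generator 'for guess_idx, feedback in feedback_history'
def pvBOuter (S : PySem.Set (String × Int)) :
    List (Int × List (String × String)) → PySem.Set (String × Int)
  | [] => S
  | (guess_idx, feedback) :: rest => pvBOuter (pvBInner S guess_idx feedback) rest

-- 'attrs = [attr for attr, _ in green_pairs]; return len(attrs) == len(set(attrs))'
-- (consumes the set's elements only through a length and another set — order-independent)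
def validate_feedback_consistency_alt (feedback_history : List (Int × (List (String × String)))) : Bool :=
  let green_pairs := pvBOuter PySem.Set.empty feedback_history
  let attrs := green_pairs.map Prod.fst
  decide (attrs.length = (PySem.Set.ofList attrs).length)

-- ===== PRECONDITION & SPEC =====
def Spec_validate_feedback_consistency (feedback_history : List (Int × (List (String × String)))) (out : Bool) : Prop := out = validate_feedback_consistency_alt feedback_history
instance (feedback_history : List (Int × (List (String × String)))) (out : Bool) : Decidable (Spec_validate_feedback_consistency feedback_history out) := by unfold Spec_validate_feedback_consistency; infer_instance

-- ===== CLAIM (what is proved, stated in full; the proofs are below) =====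
def Claim_equal_validate_feedback_consistency : Prop := ∀ (feedback_history : List (Int × (List (String × String)))), Dom_validate_feedback_consistency feedback_history → Spec_validate_feedback_consistency feedback_history (validate_feedback_consistency feedback_history)

-- ===== LEMMAS AND PROOFS =====

-- invariant: A's last-green-value dict corresponds exactly to B's set of green pairs,
-- whose first components are still duplicate-free
def pvInv (gc : PySem.Dict String Int) (S : PySem.Set (String × Int)) : Prop :=
  (S.map Prod.fst).Nodup ∧ ∀ a v, gc.get? a = some v ↔ (a, v) ∈ S

-- "B's pair set already holds two pairs with the same attr"
def pvBad (S : PySem.Set (String × Int)) : Prop := ¬ (S.map Prod.fst).Nodup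

lemma pvBadAdd (S : PySem.Set (String × Int)) (p : String × Int) (h : pvBad S) :
    pvBad (PySem.Set.add S p) := by
  rw [PySem.Set.add_eq_ite]
  split
  · exact h
  · intro hnd
    rw [List.map_append] at hnd
    exact h (List.nodup_append.mp hnd).1

lemma pvBadInner (fb : List (String × String)) (gi : Int) :
    ∀ S, pvBad S → pvBad (pvBInner S gi fb) := by
  induction fb with
  | nil => intro S h; exact h
  | cons p rest ih =>
    intro S h
    obtain ⟨attr, status⟩ := p
    simp only [pvBInner]
    split
    · exact ih _ (pvBadAdd S _ h)
    · exact ih S h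

lemma pvBadOuter (hist : List (Int × List (String × String))) :
    ∀ S, pvBad S → pvBad (pvBOuter S hist) := by
  induction hist with
  | nil => intro S h; exact h
  | cons p rest ih =>
    intro S h
    obtain ⟨gi, fb⟩ := p
    exact ih _ (pvBadInner fb gi S h)

lemma pvFoldlAddLenLe {α : Type} [BEq α] [LawfulBEq α] :
    ∀ (xs acc : List α), (xs.foldl PySem.Set.add acc).length ≤ acc.length + xs.length := by
  intro xs
  induction xs with
  | nil => intro acc; simp
  | cons x xs ih =>
    intro acc
    simp only [List.foldl_cons]
    rw [PySem.Set.add_eq_ite]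
    split
    · calc (xs.foldl PySem.Set.add acc).length ≤ acc.length + xs.length := ih acc
        _ ≤ acc.length + (x :: xs).length := by simp
    · calc (xs.foldl PySem.Set.add (acc ++ [x])).length ≤ (acc ++ [x]).length + xs.length := ih _
        _ = acc.length + (x :: xs).length := by simp; omega

lemma pvFoldlAddLenLt {α : Type} [BEq α] [LawfulBEq α] :
    ∀ (xs acc : List α), (¬ xs.Nodup ∨ ∃ y ∈ xs, y ∈ acc) →
      (xs.foldl PySem.Set.add acc).length < acc.length + xs.length := by
  intro xs
  induction xs with
  | nil =>
    intro acc h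
    rcases h with h | ⟨y, hy, _⟩
    · exact absurd List.nodup_nil h
    · simp at hy
  | cons x xs ih =>
    intro acc h
    simp only [List.foldl_cons]
    rw [PySem.Set.add_eq_ite]
    split
    · calc (xs.foldl PySem.Set.add acc).length ≤ acc.length + xs.length := pvFoldlAddLenLe xs acc
        _ < acc.length + (x :: xs).length := by simp
    · rename_i hxacc
      have hnext : ¬ xs.Nodup ∨ ∃ y ∈ xs, y ∈ acc ++ [x] := by
        rcases h with h | ⟨y, hy, hyacc⟩
        · rw [List.nodup_cons] at h
          push Not at h
          by_cases hx : x ∈ xs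
          · exact Or.inr ⟨x, hx, by simp⟩
          · exact Or.inl (h hx)
        · rcases List.mem_cons.mp hy with rfl | hy'
          · exact absurd hyacc hxacc
          · exact Or.inr ⟨y, hy', by simp [hyacc]⟩
      calc (xs.foldl PySem.Set.add (acc ++ [x])).length < (acc ++ [x]).length + xs.length := ih _ hnext
        _ = acc.length + (x :: xs).length := by simp; omega
    
lemma pvOfListLtOfNotNodup {α : Type} [BEq α] [LawfulBEq α] (xs : List α) (h : ¬ xs.Nodup) :
    (PySem.Set.ofList xs).length < xs.length := by
  rw [PySem.Set.ofList_eq_foldl]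
  simpa using pvFoldlAddLenLt xs [] (Or.inl h)

lemma pvCheckFalse (S : PySem.Set (String × Int)) (h : pvBad S) :
    decide ((S.map Prod.fst).length = (PySem.Set.ofList (S.map Prod.fst)).length) = false := by
  have := pvOfListLtOfNotNodup (S.map Prod.fst) h
  rw [decide_eq_false_iff_not]
  omega

lemma pvCheckTrue (S : PySem.Set (String × Int)) (h : (S.map Prod.fst).Nodup) :
    decide ((S.map Prod.fst).length = (PySem.Set.ofList (S.map Prod.fst)).length) = true := by
  rw [PySem.Set.ofList_eq_self_of_nodup _ h]
  exact decide_eq_true rfl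

lemma pvInnerStep (fb : List (String × String)) (gi : Int) :
    ∀ gc S, pvInv gc S →
      (pvAInner gc gi fb = none → pvBad (pvBInner S gi fb)) ∧
      (∀ gc', pvAInner gc gi fb = some gc' → pvInv gc' (pvBInner S gi fb)) := by
  induction fb with
  | nil =>
    intro gc S hinv
    refine ⟨by intro h; simp [pvAInner] at h, ?_⟩
    intro gc' h
    simp only [pvAInner, Option.some.injEq] at h
    subst h; exact hinv
  | cons p rest ih =>
    intro gc S hinv
    obtain ⟨attr, status⟩ := p
    simp only [pvAInner, pvBInner]
    by_cases himg : attr = "image_url"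
    · subst himg
      rw [if_pos rfl, if_neg (by simp)]
      exact ih gc S hinv
    · rw [if_neg himg]
      by_cases hgr : status = "green"
      · rw [if_pos hgr, if_pos ⟨himg, hgr⟩]
        cases hget : gc.get? attr with
        | some v =>
          dsimp only
          have hmem : (attr, v) ∈ S := (hinv.2 attr v).mp hget
          by_cases hv : v = gi
          · -- same value: A reinserts; B's pair is already in the set, nothing changes
            subst hv
            rw [if_neg (by omega)]
            have hadd : PySem.Set.add S (attr, v) = S := by
              rw [PySem.Set.add_eq_ite, if_pos hmem]
            rw [hadd]
            have hinv' : pvInv (gc.insert attr v) S := by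
              refine ⟨hinv.1, fun a w => ?_⟩
              by_cases ha : a = attr
              · subst ha
                rw [PySem.Dict.get?_insert_self]
                constructor
                · intro h; cases h; exact hmem
                · intro h
                  have heq : (a, w) = (a, v) := List.inj_on_of_nodup_map hinv.1 h hmem rfl
                  cases heq; rfl
              · rw [PySem.Dict.get?_insert_of_ne _ _ ha]
                exact hinv.2 a w
            exact ih _ S hinv'
          · -- contradiction: A returns none, B appends a second pair with the same attr
            rw [if_pos hv]
            have hnew : (attr, gi) ∉ S := by
              intro hmem'
              have h1 := (hinv.2 attr gi).mpr hmem'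
              rw [hget] at h1
              exact hv (by injection h1)
            have hbad : pvBad (PySem.Set.add S (attr, gi)) := by
              rw [PySem.Set.add_eq_ite, if_neg hnew]
              intro hnd
              rw [List.map_append] at hnd
              have h1 := List.nodup_append.mp hnd
              exact h1.2.2 attr (List.mem_map.mpr ⟨(attr, v), hmem, rfl⟩) attr (by simp) rfl
            exact ⟨fun _ => pvBadInner rest gi _ hbad, fun gc' h => by simp at h⟩
        | none =>
          dsimp only
          -- fresh attr: A inserts; B appends a genuinely new pair
          have hfst : attr ∉ S.map Prod.fst := by
            intro hins
            obtain ⟨⟨a', w⟩, hmem', heq⟩ := List.mem_map.mp hins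
            have h1 := (hinv.2 a' w).mpr hmem'
            rw [show a' = attr from heq, hget] at h1
            simp at h1
          have hnew : (attr, gi) ∉ S := fun hm => hfst (List.mem_map.mpr ⟨_, hm, rfl⟩)
          have hadd : PySem.Set.add S (attr, gi) = S ++ [(attr, gi)] := by
            rw [PySem.Set.add_eq_ite, if_neg hnew]
          have hinv' : pvInv (gc.insert attr gi) (PySem.Set.add S (attr, gi)) := by
            rw [hadd]
            constructor
            · rw [List.map_append, List.nodup_append]
              refine ⟨hinv.1, by simp, ?_⟩
              intro b hb1 c hc2
              simp only [List.map_cons, List.map_nil, List.mem_singleton] at hc2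
              subst hc2
              exact fun hbc => hfst (hbc ▸ hb1)
            · intro a w
              by_cases ha : a = attr
              · subst ha
                rw [PySem.Dict.get?_insert_self]
                constructor
                · intro h; cases h; simp
                · intro h
                  rcases List.mem_append.mp h with h' | h'
                  · exact absurd ((hinv.2 a w).mpr h') (by simp [hget])
                  · simp at h'; simp [h']
              · rw [PySem.Dict.get?_insert_of_ne _ _ ha]
                rw [hinv.2 a w]
                constructor
                · intro h; exact List.mem_append.mpr (Or.inl h)
                · intro h
                  rcases List.mem_append.mp h with h' | h'
                  · exact h'
                  · simp at h'; exact absurd h'.1 ha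
          exact ih _ _ hinv'
      · rw [if_neg hgr, if_neg (by simp [hgr])]
        exact ih gc S hinv

lemma pvMain (hist : List (Int × List (String × String))) :
    ∀ gc S, pvInv gc S →
      pvAOuter gc hist =
        decide (((pvBOuter S hist).map Prod.fst).length =
                (PySem.Set.ofList ((pvBOuter S hist).map Prod.fst)).length) := by
  induction hist with
  | nil =>
    intro gc S hinv
    simp only [pvAOuter, pvBOuter]
    exact (pvCheckTrue S hinv.1).symm
  | cons p rest ih =>
    intro gc S hinv
    obtain ⟨gi, fb⟩ := p
    simp only [pvAOuter, pvBOuter]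
    have hstep := pvInnerStep fb gi gc S hinv
    cases hA : pvAInner gc gi fb with
    | none =>
      have hbad := pvBadOuter rest _ (hstep.1 hA)
      exact (pvCheckFalse _ hbad).symm
    | some gc' => exact ih gc' _ (hstep.2 gc' hA)

-- ===== VERDICT (by name: the statement is the Claim_ definition above) =====
theorem validate_feedback_consistency_spec : Claim_equal_validate_feedback_consistency := by
  intro fh _
  show validate_feedback_consistency fh = validate_feedback_consistency_alt fh
  unfold validate_feedback_consistency validate_feedback_consistency_alt
  apply pvMain
  constructor
  · simp [PySem.Set.empty]
  · intro a v
    simp [PySem.Dict.empty, PySem.Dict.get?, PySem.Set.empty]
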